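-- pv_equiv track=rewrite | github.com/jooviyo001/backend-dev | utils/config_manager.py | _infer_config_type
-- ===== SOURCE A (Python) =====
-- from enum import Enum
--
-- class ConfigType(str, Enum):
--     """配置类型枚举"""
--     SYSTEM = "system"          # 系统配置
--     DATABASE = "database"      # 数据库配置
--     SECURITY = "security"      # 安全配置
--     FEATURE = "feature"        # 功能开关
--     BUSINESS = "business"      # 业务配置
--     INTEGRATION = "integration" # 集成配置
--     PERFORMANCE = "performance" # 性能配置
--     LOGGING = "logging"        # 日志配置
--
-- def _infer_config_type(key: str) -> ConfigType:
--     """推断配置类型"""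
--     key_lower = key.lower()
--
--     if any(word in key_lower for word in ['db', 'database', 'sql']):
--         return ConfigType.DATABASE
--     elif any(word in key_lower for word in ['secret', 'password', 'token', 'auth', 'security']):
--         return ConfigType.SECURITY
--     elif any(word in key_lower for word in ['enable', 'disable', 'flag', 'feature']):
--         return ConfigType.FEATURE
--     elif any(word in key_lower for word in ['log', 'logging']):
--         return ConfigType.LOGGING
--     elif any(word in key_lower for word in ['cache', 'pool', 'timeout', 'limit', 'performance']):
--         return ConfigType.PERFORMANCE
--     elif any(word in key_lower for word in ['api', 'webhook', 'integration']):
--         return ConfigType.INTEGRATION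
--     elif any(word in key_lower for word in ['business', 'company', 'default']):
--         return ConfigType.BUSINESS
--     else:
--         return ConfigType.SYSTEM
-- ===== SOURCE B (Python) =====
-- from enum import Enum
--
-- class ConfigType(str, Enum):
--     SYSTEM = "system"
--     DATABASE = "database"
--     SECURITY = "security"
--     FEATURE = "feature"
--     BUSINESS = "business"
--     INTEGRATION = "integration"
--     PERFORMANCE = "performance"
--     LOGGING = "logging"
--
-- # flat keyword -> priority rank hash (0 = highest priority)
-- _KW_RANK = {
--     'db': 0, 'database': 0, 'sql': 0,
--     'secret': 1, 'password': 1, 'token': 1, 'auth': 1, 'security': 1,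
--     'enable': 2, 'disable': 2, 'flag': 2, 'feature': 2,
--     'log': 3, 'logging': 3,
--     'cache': 4, 'pool': 4, 'timeout': 4, 'limit': 4, 'performance': 4,
--     'api': 5, 'webhook': 5, 'integration': 5,
--     'business': 6, 'company': 6, 'default': 6,
-- }
--
-- _TYPES = [ConfigType.DATABASE, ConfigType.SECURITY, ConfigType.FEATURE,
--           ConfigType.LOGGING, ConfigType.PERFORMANCE, ConfigType.INTEGRATION,
--           ConfigType.BUSINESS, ConfigType.SYSTEM]
--
-- def _infer_config_type(key: str) -> ConfigType:
--     # Enumerate substrings of the lowercased key (keyword lengths are 2..11),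
--     # look each up in the keyword->rank hash, and keep the best (lowest) rank.
--     k = key.lower()
--     n = len(k)
--     best = min((_KW_RANK[k[i:j]]
--                 for i in range(n)
--                 for j in range(i + 2, min(i + 11, n) + 1)
--                 if k[i:j] in _KW_RANK),
--                default=7)
--     return _TYPES[best]
-- ===== Notes on version B (the rewrite author's own statement) =====
-- stated objective: alternative
-- what changed: Instead of A's if/elif cascade testing each keyword's containment, B enumerates the substrings of the lowercased key (keyword lengths 2-11), looks each up in a flat keyword-to-priority-rank hash, and returns the type of the minimum rank found (default SYSTEM).
import Mathlib
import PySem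

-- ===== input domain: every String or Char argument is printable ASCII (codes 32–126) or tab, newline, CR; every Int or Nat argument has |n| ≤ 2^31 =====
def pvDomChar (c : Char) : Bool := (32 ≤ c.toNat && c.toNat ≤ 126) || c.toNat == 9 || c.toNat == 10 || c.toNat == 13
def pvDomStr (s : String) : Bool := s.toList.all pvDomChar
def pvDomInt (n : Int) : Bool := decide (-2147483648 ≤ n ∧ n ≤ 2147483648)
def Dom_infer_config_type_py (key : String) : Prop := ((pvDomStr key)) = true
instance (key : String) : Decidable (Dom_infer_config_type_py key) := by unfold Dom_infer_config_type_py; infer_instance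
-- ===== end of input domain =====

-- B replaces A's per-keyword containment cascade by enumerating the substrings of the
-- lowercased key (keyword lengths are 2..11), looking each up in a flat keyword -> priority-rank
-- hash, and returning the type of the best (lowest) rank found (objective: alternative).

-- ===== PORT A =====
def infer_config_type_py (key : String) : String :=
  let key_lower := PySem.Str.lower key
  if ["db", "database", "sql"].any (fun word => PySem.Str.isIn word key_lower) then
    "database"
  else if ["secret", "password", "token", "auth", "security"].any (fun word => PySem.Str.isIn word key_lower) then
    "security"
  else if ["enable", "disable", "flag", "feature"].any (fun word => PySem.Str.isIn word key_lower) then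
    "feature"
  else if ["log", "logging"].any (fun word => PySem.Str.isIn word key_lower) then
    "logging"
  else if ["cache", "pool", "timeout", "limit", "performance"].any (fun word => PySem.Str.isIn word key_lower) then
    "performance"
  else if ["api", "webhook", "integration"].any (fun word => PySem.Str.isIn word key_lower) then
    "integration"
  else if ["business", "company", "default"].any (fun word => PySem.Str.isIn word key_lower) then
    "business"
  else
    "system"

-- ===== PORT B =====
-- _KW_RANK: flat keyword -> priority rank hash (keys as char lists: PySem's string representation)
def kwPairs : List (List Char × Int) :=
  [("db".toList, 0), ("database".toList, 0), ("sql".toList, 0),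
   ("secret".toList, 1), ("password".toList, 1), ("token".toList, 1), ("auth".toList, 1), ("security".toList, 1),
   ("enable".toList, 2), ("disable".toList, 2), ("flag".toList, 2), ("feature".toList, 2),
   ("log".toList, 3), ("logging".toList, 3),
   ("cache".toList, 4), ("pool".toList, 4), ("timeout".toList, 4), ("limit".toList, 4), ("performance".toList, 4),
   ("api".toList, 5), ("webhook".toList, 5), ("integration".toList, 5),
   ("business".toList, 6), ("company".toList, 6), ("default".toList, 6)]

def kwRank : PySem.Dict (List Char) Int := PySem.Dict.ofList kwPairs

def pyTypes : List String :=
  ["database", "security", "feature", "logging", "performance", "integration", "business", "system"]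

def infer_config_type_py_alt (key : String) : String :=
  let cs := (PySem.Str.lower key).toList          -- k = key.lower(), viewed as chars
  let n : Int := PySem.List.len cs                -- n = len(k)
  -- best = min((_KW_RANK[k[i:j]] for i in range(n) for j in range(i+2, min(i+11, n)+1)
  --             if k[i:j] in _KW_RANK), default=7)
  let cands : List Int := (PySem.List.pyRange 0 n 1).flatMap (fun i =>
    (PySem.List.pyRange (i + 2) (min (i + 11) n + 1) 1).filterMap (fun j =>
      kwRank.get? (PySem.List.slice cs (some i) (some j))))
  let best := PySem.List.minD cands (fun r => r) 7
  -- _TYPES[best]; best is always in [0, 7], so the getD default is unreachable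
  (PySem.List.pyGet? pyTypes best).getD "system"

-- ===== PRECONDITION & SPEC =====
def Spec_infer_config_type_py (key : String) (out : String) : Prop := out = infer_config_type_py_alt key
instance (key : String) (out : String) : Decidable (Spec_infer_config_type_py key out) := by unfold Spec_infer_config_type_py; infer_instance

-- ===== CLAIM (what is proved, stated in full; the proofs are below) =====
def Claim_equal_infer_config_type_py : Prop := ∀ (key : String), Dom_infer_config_type_py key → Spec_infer_config_type_py key (infer_config_type_py key)

-- ===== LEMMAS AND PROOFS =====

-- a contiguous piece (drop then take) of a list is an infix of it
lemma take_drop_infix {α : Type} (l : List α) (a m : Nat) : (l.drop a).take m <:+: l :=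
  ((List.take_prefix m (l.drop a)).isInfix).trans ((List.drop_suffix a l).isInfix)

-- lookup in the keyword hash = membership in the literal pair list
lemma get?_kwRank (w : List Char) (r : Int) : kwRank.get? w = some r ↔ (w, r) ∈ kwPairs := by
  have hnd : kwRank.keys.Nodup := PySem.Dict.nodup_keys_ofList kwPairs
  have hit : kwRank.items = kwPairs := by decide
  rw [PySem.Dict.get?_eq_some_iff_mem_items kwRank w r hnd, hit]

-- every keyword has length 2..11 and rank 0..6
lemma kwPairs_facts (w : List Char) (r : Int) (h : (w, r) ∈ kwPairs) :
    2 ≤ w.length ∧ w.length ≤ 11 ∧ 0 ≤ r ∧ r ≤ 6 := by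
  have hall : ∀ p ∈ kwPairs, 2 ≤ p.1.length ∧ p.1.length ≤ 11 ∧ 0 ≤ p.2 ∧ p.2 ≤ 6 := by decide
  exact hall (w, r) h

-- the candidate list of B's comprehension contains exactly the ranks of keywords that occur in cs
lemma mem_cands (cs : List Char) (r : Int) :
    r ∈ (PySem.List.pyRange 0 (PySem.List.len cs) 1).flatMap (fun i =>
      (PySem.List.pyRange (i + 2) (min (i + 11) (PySem.List.len cs) + 1) 1).filterMap (fun j =>
        kwRank.get? (PySem.List.slice cs (some i) (some j)))) ↔
    ∃ w, (w, r) ∈ kwPairs ∧ w <:+: cs := by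
  simp only [List.mem_flatMap, List.mem_filterMap, PySem.List.len_eq, PySem.List.mem_pyRange_one]
  constructor
  · rintro ⟨i, ⟨hi0, hin⟩, j, ⟨hj1, hj2⟩, hget⟩
    refine ⟨PySem.List.slice cs (some i) (some j), (get?_kwRank _ r).mp hget, ?_⟩
    rw [PySem.List.slice_toNat cs (show (0:Int) ≤ i by omega) (show (0:Int) ≤ j by omega)]
    exact take_drop_infix cs i.toNat (j.toNat - i.toNat)
  · rintro ⟨w, hmem, s, t, hst⟩
    obtain ⟨h2, h11, -, -⟩ := kwPairs_facts w r hmem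
    have hlen : cs.length = s.length + w.length + t.length := by
      rw [← hst]; simp; omega
    refine ⟨(s.length : Int), ⟨by positivity, by omega⟩,
            (s.length : Int) + (w.length : Int), ⟨by omega, by omega⟩, ?_⟩
    rw [PySem.List.slice_natCast_add, ← hst, List.append_assoc, List.drop_left, List.take_left]
    exact (get?_kwRank w r).mpr hmem

-- min(l, default=7) equals any c that is in l and below every element
lemma minD_eq_min (l : List Int) (c : Int) (hc : c ∈ l) (hmin : ∀ x ∈ l, c ≤ x) :
    PySem.List.minD l (fun r => r) 7 = c := by
  unfold PySem.List.minD
  cases h : PySem.List.min? l (fun r => r) with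
  | none =>
    rw [PySem.List.min?_eq_none_iff] at h
    subst h
    simp at hc
  | some m =>
    have h1 : m ≤ c := PySem.List.min?_isMin h c hc
    have h2 : c ≤ m := hmin m (PySem.List.min?_mem h)
    simpa using le_antisymm h1 h2

lemma minD_empty (l : List Int) (h : ∀ x, x ∉ l) :
    PySem.List.minD l (fun r => r) 7 = 7 := by
  rw [List.eq_nil_iff_forall_not_mem.mpr h]
  rfl

-- keyword groups: membership of a rank-r keyword ↔ A's group-r test fires
lemma match0 (k : String) :
    (∃ w, (w, (0 : Int)) ∈ kwPairs ∧ w <:+: k.toList) ↔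
    ["db", "database", "sql"].any (fun word => PySem.Str.isIn word k) = true := by
  simp [kwPairs, PySem.Chars.isIn_iff_infix]
lemma match1 (k : String) :
    (∃ w, (w, (1 : Int)) ∈ kwPairs ∧ w <:+: k.toList) ↔
    ["secret", "password", "token", "auth", "security"].any (fun word => PySem.Str.isIn word k) = true := by
  simp [kwPairs, PySem.Chars.isIn_iff_infix]
lemma match2 (k : String) :
    (∃ w, (w, (2 : Int)) ∈ kwPairs ∧ w <:+: k.toList) ↔
    ["enable", "disable", "flag", "feature"].any (fun word => PySem.Str.isIn word k) = true := by
  simp [kwPairs, PySem.Chars.isIn_iff_infix]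
lemma match3 (k : String) :
    (∃ w, (w, (3 : Int)) ∈ kwPairs ∧ w <:+: k.toList) ↔
    ["log", "logging"].any (fun word => PySem.Str.isIn word k) = true := by
  simp [kwPairs, PySem.Chars.isIn_iff_infix]
lemma match4 (k : String) :
    (∃ w, (w, (4 : Int)) ∈ kwPairs ∧ w <:+: k.toList) ↔
    ["cache", "pool", "timeout", "limit", "performance"].any (fun word => PySem.Str.isIn word k) = true := by
  simp [kwPairs, PySem.Chars.isIn_iff_infix]
lemma match5 (k : String) :
    (∃ w, (w, (5 : Int)) ∈ kwPairs ∧ w <:+: k.toList) ↔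
    ["api", "webhook", "integration"].any (fun word => PySem.Str.isIn word k) = true := by
  simp [kwPairs, PySem.Chars.isIn_iff_infix]
lemma match6 (k : String) :
    (∃ w, (w, (6 : Int)) ∈ kwPairs ∧ w <:+: k.toList) ↔
    ["business", "company", "default"].any (fun word => PySem.Str.isIn word k) = true := by
  simp [kwPairs, PySem.Chars.isIn_iff_infix]

-- ===== VERDICT (by name: the statement is the Claim_ definition above) =====
theorem infer_config_type_py_spec : Claim_equal_infer_config_type_py := by
  intro key _
  simp only [Spec_infer_config_type_py, infer_config_type_py, infer_config_type_py_alt]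
  set k := PySem.Str.lower key with hk
  set cands := (PySem.List.pyRange 0 (PySem.List.len k.toList) 1).flatMap (fun i =>
    (PySem.List.pyRange (i + 2) (min (i + 11) (PySem.List.len k.toList) + 1) 1).filterMap (fun j =>
      kwRank.get? (PySem.List.slice k.toList (some i) (some j)))) with hc
  have hmc : ∀ r : Int, r ∈ cands ↔ ∃ w, (w, r) ∈ kwPairs ∧ w <:+: k.toList := by
    rw [hc]; exact mem_cands k.toList
  by_cases b0 : ["db", "database", "sql"].any (fun word => PySem.Str.isIn word k) = true
  · rw [minD_eq_min cands 0 ((hmc 0).mpr ((match0 k).mpr b0)) (fun x hx => by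
        obtain ⟨w, hw, hinf⟩ := (hmc x).mp hx
        obtain ⟨-, -, hx0, -⟩ := kwPairs_facts w x hw
        omega)]
    simp only [b0, if_true]
    decide
  · by_cases b1 : ["secret", "password", "token", "auth", "security"].any (fun word => PySem.Str.isIn word k) = true
    · rw [minD_eq_min cands 1 ((hmc 1).mpr ((match1 k).mpr b1)) (fun x hx => by
          obtain ⟨w, hw, hinf⟩ := (hmc x).mp hx
          obtain ⟨-, -, hx0, -⟩ := kwPairs_facts w x hw
          by_contra hlt
          have hup : x ≤ 0 := by omega
          interval_cases x
          · exact b0 ((match0 k).mp ⟨w, hw, hinf⟩))]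
      simp only [b0, b1, if_true]
      decide
    · by_cases b2 : ["enable", "disable", "flag", "feature"].any (fun word => PySem.Str.isIn word k) = true
      · rw [minD_eq_min cands 2 ((hmc 2).mpr ((match2 k).mpr b2)) (fun x hx => by
            obtain ⟨w, hw, hinf⟩ := (hmc x).mp hx
            obtain ⟨-, -, hx0, -⟩ := kwPairs_facts w x hw
            by_contra hlt
            have hup : x ≤ 1 := by omega
            interval_cases x
            · exact b0 ((match0 k).mp ⟨w, hw, hinf⟩)
            · exact b1 ((match1 k).mp ⟨w, hw, hinf⟩))]
        simp only [b0, b1, b2, if_true]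
        decide
      · by_cases b3 : ["log", "logging"].any (fun word => PySem.Str.isIn word k) = true
        · rw [minD_eq_min cands 3 ((hmc 3).mpr ((match3 k).mpr b3)) (fun x hx => by
              obtain ⟨w, hw, hinf⟩ := (hmc x).mp hx
              obtain ⟨-, -, hx0, -⟩ := kwPairs_facts w x hw
              by_contra hlt
              have hup : x ≤ 2 := by omega
              interval_cases x
              · exact b0 ((match0 k).mp ⟨w, hw, hinf⟩)
              · exact b1 ((match1 k).mp ⟨w, hw, hinf⟩)
              · exact b2 ((match2 k).mp ⟨w, hw, hinf⟩))]
          simp only [b0, b1, b2, b3, if_true]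
          decide
        · by_cases b4 : ["cache", "pool", "timeout", "limit", "performance"].any (fun word => PySem.Str.isIn word k) = true
          · rw [minD_eq_min cands 4 ((hmc 4).mpr ((match4 k).mpr b4)) (fun x hx => by
                obtain ⟨w, hw, hinf⟩ := (hmc x).mp hx
                obtain ⟨-, -, hx0, -⟩ := kwPairs_facts w x hw
                by_contra hlt
                have hup : x ≤ 3 := by omega
                interval_cases x
                · exact b0 ((match0 k).mp ⟨w, hw, hinf⟩)
                · exact b1 ((match1 k).mp ⟨w, hw, hinf⟩)
                · exact b2 ((match2 k).mp ⟨w, hw, hinf⟩)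
                · exact b3 ((match3 k).mp ⟨w, hw, hinf⟩))]
            simp only [b0, b1, b2, b3, b4, if_true]
            decide
          · by_cases b5 : ["api", "webhook", "integration"].any (fun word => PySem.Str.isIn word k) = true
            · rw [minD_eq_min cands 5 ((hmc 5).mpr ((match5 k).mpr b5)) (fun x hx => by
                  obtain ⟨w, hw, hinf⟩ := (hmc x).mp hx
                  obtain ⟨-, -, hx0, -⟩ := kwPairs_facts w x hw
                  by_contra hlt
                  have hup : x ≤ 4 := by omega
                  interval_cases x
                  · exact b0 ((match0 k).mp ⟨w, hw, hinf⟩)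
                  · exact b1 ((match1 k).mp ⟨w, hw, hinf⟩)
                  · exact b2 ((match2 k).mp ⟨w, hw, hinf⟩)
                  · exact b3 ((match3 k).mp ⟨w, hw, hinf⟩)
                  · exact b4 ((match4 k).mp ⟨w, hw, hinf⟩))]
              simp only [b0, b1, b2, b3, b4, b5, if_true]
              decide
            · by_cases b6 : ["business", "company", "default"].any (fun word => PySem.Str.isIn word k) = true
              · rw [minD_eq_min cands 6 ((hmc 6).mpr ((match6 k).mpr b6)) (fun x hx => by
                    obtain ⟨w, hw, hinf⟩ := (hmc x).mp hx
                    obtain ⟨-, -, hx0, -⟩ := kwPairs_facts w x hw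
                    by_contra hlt
                    have hup : x ≤ 5 := by omega
                    interval_cases x
                    · exact b0 ((match0 k).mp ⟨w, hw, hinf⟩)
                    · exact b1 ((match1 k).mp ⟨w, hw, hinf⟩)
                    · exact b2 ((match2 k).mp ⟨w, hw, hinf⟩)
                    · exact b3 ((match3 k).mp ⟨w, hw, hinf⟩)
                    · exact b4 ((match4 k).mp ⟨w, hw, hinf⟩)
                    · exact b5 ((match5 k).mp ⟨w, hw, hinf⟩))]
                simp only [b0, b1, b2, b3, b4, b5, b6, if_true]
                decide
              · rw [minD_empty cands (fun x hx => by
                    obtain ⟨w, hw, hinf⟩ := (hmc x).mp hx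
                    obtain ⟨-, -, hx0, hx6⟩ := kwPairs_facts w x hw
                    interval_cases x
                    · exact b0 ((match0 k).mp ⟨w, hw, hinf⟩)
                    · exact b1 ((match1 k).mp ⟨w, hw, hinf⟩)
                    · exact b2 ((match2 k).mp ⟨w, hw, hinf⟩)
                    · exact b3 ((match3 k).mp ⟨w, hw, hinf⟩)
                    · exact b4 ((match4 k).mp ⟨w, hw, hinf⟩)
                    · exact b5 ((match5 k).mp ⟨w, hw, hinf⟩)
                    · exact b6 ((match6 k).mp ⟨w, hw, hinf⟩))]
                simp only [b0, b1, b2, b3, b4, b5, b6]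
                decide
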